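-- pv_equiv track=rewrite | github.com/dkoutavas/drumgen | humanizer.py | infer_section_type
-- ===== SOURCE A (Python) =====
-- def infer_section_type(cell):
--     """Infer section type from cell tags for push/pull drift."""
--     tags = cell.get("tags", [])
--     if any(t in tags for t in ("blast", "extreme")):
--         return "blast"
--     if any(t in tags for t in ("build", "crescendo")):
--         return "build"
--     if any(t in tags for t in ("breakdown", "half_time")):
--         return "breakdown"
--     if any(t in tags for t in ("atmospheric", "sparse", "quiet")):
--         return "atmospheric"
--     if any(t in tags for t in ("driving", "intense")):
--         return "drive"
--     if any(t in tags for t in ("fill",)):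
--         return "fill"
--     return "verse"
-- ===== SOURCE B (Python) =====
-- TAG_RULES = {
--     "blast": (0, "blast"), "extreme": (0, "blast"),
--     "build": (1, "build"), "crescendo": (1, "build"),
--     "breakdown": (2, "breakdown"), "half_time": (2, "breakdown"),
--     "atmospheric": (3, "atmospheric"), "sparse": (3, "atmospheric"), "quiet": (3, "atmospheric"),
--     "driving": (4, "drive"), "intense": (4, "drive"),
--     "fill": (5, "fill"),
-- }
--
--
-- def infer_section_type(cell):
--     """Infer section type: one pass over the tags, keeping the highest-priority hit."""
--     best = (6, "verse")
--     for t in cell.get("tags", []):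
--         cand = TAG_RULES.get(t, (6, "verse"))
--         if cand[0] < best[0]:
--             best = cand
--     return best[1]
-- ===== Notes on version B (the rewrite author's own statement) =====
-- stated objective: alternative
-- what changed: A scans the tag list repeatedly (one membership scan per trigger tag, in group order); B makes a single pass over the tags, mapping each tag through a tag->(priority, name) table and keeping the minimum-priority hit.
import Mathlib
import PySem

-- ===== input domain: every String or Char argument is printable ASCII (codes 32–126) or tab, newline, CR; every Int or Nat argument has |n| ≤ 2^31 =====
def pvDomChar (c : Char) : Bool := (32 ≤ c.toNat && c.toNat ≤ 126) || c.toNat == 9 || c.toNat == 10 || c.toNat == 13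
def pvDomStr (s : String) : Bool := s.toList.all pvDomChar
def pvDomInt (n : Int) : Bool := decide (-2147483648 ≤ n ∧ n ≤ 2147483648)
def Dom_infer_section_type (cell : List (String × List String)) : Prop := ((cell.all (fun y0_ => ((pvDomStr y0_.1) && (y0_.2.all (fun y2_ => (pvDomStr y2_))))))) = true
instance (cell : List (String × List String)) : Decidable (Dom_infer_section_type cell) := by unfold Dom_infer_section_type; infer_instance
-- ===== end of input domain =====

-- B replaces A's per-group membership scans by ONE pass over the tags, keeping the
-- minimum-priority hit from a tag→(priority, name) table (alternative decomposition).

-- ===== PORT A =====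
def infer_section_type (cell : List (String × List String)) : String :=
  let tags := (PySem.Dict.mk cell).getD "tags" []
  if ["blast", "extreme"].any (fun t => tags.contains t) then "blast"
  else if ["build", "crescendo"].any (fun t => tags.contains t) then "build"
  else if ["breakdown", "half_time"].any (fun t => tags.contains t) then "breakdown"
  else if ["atmospheric", "sparse", "quiet"].any (fun t => tags.contains t) then "atmospheric"
  else if ["driving", "intense"].any (fun t => tags.contains t) then "drive"
  else if ["fill"].any (fun t => tags.contains t) then "fill"
  else "verse"

-- ===== PORT B =====
-- the TAG_RULES dict from Source B
def pvTagRules : PySem.Dict String (Nat × String) :=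
  PySem.Dict.mk
    [("blast", (0, "blast")), ("extreme", (0, "blast")),
     ("build", (1, "build")), ("crescendo", (1, "build")),
     ("breakdown", (2, "breakdown")), ("half_time", (2, "breakdown")),
     ("atmospheric", (3, "atmospheric")), ("sparse", (3, "atmospheric")), ("quiet", (3, "atmospheric")),
     ("driving", (4, "drive")), ("intense", (4, "drive")),
     ("fill", (5, "fill"))]

def infer_section_type_alt (cell : List (String × List String)) : String :=
  let tags := (PySem.Dict.mk cell).getD "tags" []
  let best := tags.foldl
    (fun best t =>
      let cand := pvTagRules.getD t (6, "verse")
      if cand.1 < best.1 then cand else best)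
    (6, "verse")
  best.2

-- ===== PRECONDITION & SPEC =====
def Spec_infer_section_type (cell : List (String × List String)) (out : String) : Prop := out = infer_section_type_alt cell
instance (cell : List (String × List String)) (out : String) : Decidable (Spec_infer_section_type cell out) := by unfold Spec_infer_section_type; infer_instance

-- ===== CLAIM (what is proved, stated in full; the proofs are below) =====
def Claim_equal_infer_section_type : Prop := ∀ (cell : List (String × List String)), Dom_infer_section_type cell → Spec_infer_section_type cell (infer_section_type cell)

-- ===== LEMMAS AND PROOFS =====

-- priority of a single tag (proof-side shadow of TAG_RULES)
def pvPrio (t : String) : Nat :=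
  if t = "blast" ∨ t = "extreme" then 0
  else if t = "build" ∨ t = "crescendo" then 1
  else if t = "breakdown" ∨ t = "half_time" then 2
  else if t = "atmospheric" ∨ t = "sparse" ∨ t = "quiet" then 3
  else if t = "driving" ∨ t = "intense" then 4
  else if t = "fill" then 5
  else 6

def pvName (k : Nat) : String :=
  if k = 0 then "blast" else if k = 1 then "build" else if k = 2 then "breakdown"
  else if k = 3 then "atmospheric" else if k = 4 then "drive" else if k = 5 then "fill"
  else "verse"

-- A's if-chain as a function of the tag list
def pvChain (tags : List String) : String :=
  if ["blast", "extreme"].any (fun t => tags.contains t) then "blast"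
  else if ["build", "crescendo"].any (fun t => tags.contains t) then "build"
  else if ["breakdown", "half_time"].any (fun t => tags.contains t) then "breakdown"
  else if ["atmospheric", "sparse", "quiet"].any (fun t => tags.contains t) then "atmospheric"
  else if ["driving", "intense"].any (fun t => tags.contains t) then "drive"
  else if ["fill"].any (fun t => tags.contains t) then "fill"
  else "verse"

lemma pvTagRules_spec (t : String) :
    pvTagRules.getD t (6, "verse") = (pvPrio t, pvName (pvPrio t)) := by
  unfold pvPrio
  split_ifs with h1 h2 h3 h4 h5 h6
  · rcases h1 with h | h <;> subst h <;> rfl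
  · rcases h2 with h | h <;> subst h <;> rfl
  · rcases h3 with h | h <;> subst h <;> rfl
  · rcases h4 with h | h | h <;> subst h <;> rfl
  · rcases h5 with h | h <;> subst h <;> rfl
  · subst h6; rfl
  · push Not at h1 h2 h3 h4 h5
    have b1 : (("blast" : String) == t) = false := beq_eq_false_iff_ne.mpr (Ne.symm h1.1)
    have b2 : (("extreme" : String) == t) = false := beq_eq_false_iff_ne.mpr (Ne.symm h1.2)
    have b3 : (("build" : String) == t) = false := beq_eq_false_iff_ne.mpr (Ne.symm h2.1)
    have b4 : (("crescendo" : String) == t) = false := beq_eq_false_iff_ne.mpr (Ne.symm h2.2)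
    have b5 : (("breakdown" : String) == t) = false := beq_eq_false_iff_ne.mpr (Ne.symm h3.1)
    have b6 : (("half_time" : String) == t) = false := beq_eq_false_iff_ne.mpr (Ne.symm h3.2)
    have b7 : (("atmospheric" : String) == t) = false := beq_eq_false_iff_ne.mpr (Ne.symm h4.1)
    have b8 : (("sparse" : String) == t) = false := beq_eq_false_iff_ne.mpr (Ne.symm h4.2.1)
    have b9 : (("quiet" : String) == t) = false := beq_eq_false_iff_ne.mpr (Ne.symm h4.2.2)
    have b10 : (("driving" : String) == t) = false := beq_eq_false_iff_ne.mpr (Ne.symm h5.1)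
    have b11 : (("intense" : String) == t) = false := beq_eq_false_iff_ne.mpr (Ne.symm h5.2)
    have b12 : (("fill" : String) == t) = false := beq_eq_false_iff_ne.mpr (Ne.symm h6)
    simp [pvTagRules, PySem.Dict.getD, PySem.Dict.get?, List.find?,
      b1, b2, b3, b4, b5, b6, b7, b8, b9, b10, b11, b12, pvName]

-- numeric min-fold over priorities (first component of B's fold)
def pvFoldMin (tags : List String) (k : Nat) : Nat :=
  tags.foldl (fun b t => if pvPrio t < b then pvPrio t else b) k

lemma pvFoldMin_cons (t : String) (ts : List String) (k : Nat) :
    pvFoldMin (t :: ts) k = pvFoldMin ts (if pvPrio t < k then pvPrio t else k) := rfl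

-- rewrite B's fold step via pvTagRules_spec
lemma pvFoldStepEq (tags : List String) (init : Nat × String) :
    tags.foldl (fun best t =>
        let cand := pvTagRules.getD t (6, "verse")
        if cand.1 < best.1 then cand else best) init
      = tags.foldl (fun best t =>
          if pvPrio t < best.1 then (pvPrio t, pvName (pvPrio t)) else best) init := by
  induction tags generalizing init with
  | nil => rfl
  | cons t ts ih =>
    rw [List.foldl_cons, List.foldl_cons, ih]
    congr 1
    simp only [pvTagRules_spec]

-- the fold carries (k, pvName k) pairs; its first component is pvFoldMin
lemma pvFoldPair (tags : List String) (k : Nat) :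
    tags.foldl (fun best t =>
        if pvPrio t < best.1 then (pvPrio t, pvName (pvPrio t)) else best) (k, pvName k)
      = (pvFoldMin tags k, pvName (pvFoldMin tags k)) := by
  induction tags generalizing k with
  | nil => rfl
  | cons t ts ih =>
    rw [List.foldl_cons, pvFoldMin_cons]
    by_cases h : pvPrio t < k
    · rw [if_pos h, if_pos h]; exact ih (pvPrio t)
    · rw [if_neg h, if_neg h]; exact ih k

lemma pvFoldMin_le_iff (ts : List String) (k n : Nat) :
    pvFoldMin ts k ≤ n ↔ k ≤ n ∨ ∃ x ∈ ts, pvPrio x ≤ n := by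
  induction ts generalizing k with
  | nil => simp [pvFoldMin]
  | cons t ts ih =>
    rw [pvFoldMin_cons, ih]
    by_cases hc : pvPrio t < k
    · rw [if_pos hc]
      constructor
      · rintro (h | ⟨x, hx, hp⟩)
        · exact Or.inr ⟨t, List.mem_cons_self, h⟩
        · exact Or.inr ⟨x, List.mem_cons_of_mem _ hx, hp⟩
      · rintro (h | ⟨x, hx, hp⟩)
        · exact Or.inl (by omega)
        · rcases List.mem_cons.mp hx with rfl | hx'
          · exact Or.inl hp
          · exact Or.inr ⟨x, hx', hp⟩
    · rw [if_neg hc]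
      constructor
      · rintro (h | ⟨x, hx, hp⟩)
        · exact Or.inl h
        · exact Or.inr ⟨x, List.mem_cons_of_mem _ hx, hp⟩
      · rintro (h | ⟨x, hx, hp⟩)
        · exact Or.inl h
        · rcases List.mem_cons.mp hx with rfl | hx'
          · exact Or.inl (by omega)
          · exact Or.inr ⟨x, hx', hp⟩

-- cumulative groups: pvPrio x ≤ n ↔ x is one of the tags of priority ≤ n
lemma pvLe0 (x : String) : pvPrio x ≤ 0 ↔ x ∈ (["blast", "extreme"] : List String) := by
  unfold pvPrio; split_ifs <;> simp_all <;> first | omega | tauto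
lemma pvLe1 (x : String) : pvPrio x ≤ 1 ↔ x ∈ (["blast", "extreme"] ++ ["build", "crescendo"] : List String) := by
  unfold pvPrio; split_ifs <;> simp_all <;> first | omega | tauto
lemma pvLe2 (x : String) : pvPrio x ≤ 2 ↔ x ∈ (["blast", "extreme"] ++ (["build", "crescendo"] ++ ["breakdown", "half_time"]) : List String) := by
  unfold pvPrio; split_ifs <;> simp_all <;> first | omega | tauto
lemma pvLe3 (x : String) : pvPrio x ≤ 3 ↔ x ∈ (["blast", "extreme"] ++ (["build", "crescendo"] ++ (["breakdown", "half_time"] ++ ["atmospheric", "sparse", "quiet"])) : List String) := by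
  unfold pvPrio; split_ifs <;> simp_all <;> first | omega | tauto
lemma pvLe4 (x : String) : pvPrio x ≤ 4 ↔ x ∈ (["blast", "extreme"] ++ (["build", "crescendo"] ++ (["breakdown", "half_time"] ++ (["atmospheric", "sparse", "quiet"] ++ ["driving", "intense"]))) : List String) := by
  unfold pvPrio; split_ifs <;> simp_all <;> first | omega | tauto
lemma pvLe5 (x : String) : pvPrio x ≤ 5 ↔ x ∈ (["blast", "extreme"] ++ (["build", "crescendo"] ++ (["breakdown", "half_time"] ++ (["atmospheric", "sparse", "quiet"] ++ (["driving", "intense"] ++ ["fill"])))) : List String) := by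
  unfold pvPrio; split_ifs <;> simp_all <;> first | omega | tauto

-- generic stage lemma: the running minimum is ≤ n iff some tag of priority ≤ n occurs
lemma pvStage (tags : List String) (n : Nat) (L : List String)
    (hL : ∀ x, pvPrio x ≤ n ↔ x ∈ L) (hn : n < 6) :
    pvFoldMin tags 6 ≤ n ↔ ∃ s ∈ L, s ∈ tags := by
  rw [pvFoldMin_le_iff]
  constructor
  · rintro (h | ⟨x, hx, hp⟩)
    · omega
    · exact ⟨x, (hL x).mp hp, hx⟩
  · rintro ⟨s, hs, hst⟩
    exact Or.inr ⟨s, hst, (hL s).mpr hs⟩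

lemma pvExAppend (L1 L2 tags : List String) :
    (∃ s ∈ L1 ++ L2, s ∈ tags) ↔ (∃ s ∈ L1, s ∈ tags) ∨ (∃ s ∈ L2, s ∈ tags) := by
  constructor
  · rintro ⟨s, hs, hst⟩
    rcases List.mem_append.mp hs with h | h
    · exact Or.inl ⟨s, h, hst⟩
    · exact Or.inr ⟨s, h, hst⟩
  · rintro (⟨s, hs, hst⟩ | ⟨s, hs, hst⟩)
    · exact ⟨s, List.mem_append.mpr (Or.inl hs), hst⟩
    · exact ⟨s, List.mem_append.mpr (Or.inr hs), hst⟩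

lemma pvAnyIff (L tags : List String) :
    ((L.any (fun t => tags.contains t)) = true) ↔ ∃ s ∈ L, s ∈ tags := by
  simp [List.any_eq_true]

lemma pvMain (tags : List String) : pvChain tags = pvName (pvFoldMin tags 6) := by
  have u0 := pvStage tags 0 _ pvLe0 (by omega)
  have u1 := pvStage tags 1 _ pvLe1 (by omega)
  have u2 := pvStage tags 2 _ pvLe2 (by omega)
  have u3 := pvStage tags 3 _ pvLe3 (by omega)
  have u4 := pvStage tags 4 _ pvLe4 (by omega)
  have u5 := pvStage tags 5 _ pvLe5 (by omega)
  rw [pvExAppend] at u1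
  rw [pvExAppend, pvExAppend] at u2
  rw [pvExAppend, pvExAppend, pvExAppend] at u3
  rw [pvExAppend, pvExAppend, pvExAppend, pvExAppend] at u4
  rw [pvExAppend, pvExAppend, pvExAppend, pvExAppend, pvExAppend] at u5
  set M := pvFoldMin tags 6 with hM
  unfold pvChain
  simp only [pvAnyIff]
  by_cases d0 : ∃ s ∈ (["blast", "extreme"] : List String), s ∈ tags
  · have h : M = 0 := by have := u0.mpr d0; omega
    rw [if_pos d0, h]; rfl
  · have n0 : ¬ M ≤ 0 := fun hh => d0 (u0.mp hh)
    by_cases d1 : ∃ s ∈ (["build", "crescendo"] : List String), s ∈ tags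
    · have h : M = 1 := by have := u1.mpr (Or.inr d1); omega
      rw [if_neg d0, if_pos d1, h]; rfl
    · have n1 : ¬ M ≤ 1 := fun hh => by rcases u1.mp hh with h | h <;> tauto
      by_cases d2 : ∃ s ∈ (["breakdown", "half_time"] : List String), s ∈ tags
      · have h : M = 2 := by have := u2.mpr (Or.inr (Or.inr d2)); omega
        rw [if_neg d0, if_neg d1, if_pos d2, h]; rfl
      · have n2 : ¬ M ≤ 2 := fun hh => by rcases u2.mp hh with h | h | h <;> tauto
        by_cases d3 : ∃ s ∈ (["atmospheric", "sparse", "quiet"] : List String), s ∈ tags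
        · have h : M = 3 := by have := u3.mpr (Or.inr (Or.inr (Or.inr d3))); omega
          rw [if_neg d0, if_neg d1, if_neg d2, if_pos d3, h]; rfl
        · have n3 : ¬ M ≤ 3 := fun hh => by rcases u3.mp hh with h | h | h | h <;> tauto
          by_cases d4 : ∃ s ∈ (["driving", "intense"] : List String), s ∈ tags
          · have h : M = 4 := by have := u4.mpr (Or.inr (Or.inr (Or.inr (Or.inr d4)))); omega
            rw [if_neg d0, if_neg d1, if_neg d2, if_neg d3, if_pos d4, h]; rfl
          · have n4 : ¬ M ≤ 4 := fun hh => by rcases u4.mp hh with h | h | h | h | h <;> tauto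
            by_cases d5 : ∃ s ∈ (["fill"] : List String), s ∈ tags
            · have h : M = 5 := by have := u5.mpr (Or.inr (Or.inr (Or.inr (Or.inr (Or.inr d5))))); omega
              rw [if_neg d0, if_neg d1, if_neg d2, if_neg d3, if_neg d4, if_pos d5, h]; rfl
            · have n5 : ¬ M ≤ 5 := fun hh => by rcases u5.mp hh with h | h | h | h | h | h <;> tauto
              rw [if_neg d0, if_neg d1, if_neg d2, if_neg d3, if_neg d4, if_neg d5]
              unfold pvName
              split_ifs <;> first | rfl | omega

lemma pvChain_A (cell : List (String × List String)) :
    infer_section_type cell = pvChain ((PySem.Dict.mk cell).getD "tags" []) := rfl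

lemma pvAlt_eq (cell : List (String × List String)) :
    infer_section_type_alt cell
      = pvName (pvFoldMin ((PySem.Dict.mk cell).getD "tags" []) 6) := by
  change (((PySem.Dict.mk cell).getD "tags" []).foldl
      (fun best t =>
        let cand := pvTagRules.getD t (6, "verse")
        if cand.1 < best.1 then cand else best) (6, "verse")).2 = _
  rw [pvFoldStepEq]
  rw [show ((6, "verse") : Nat × String) = (6, pvName 6) from rfl, pvFoldPair]

-- ===== VERDICT (by name: the statement is the Claim_ definition above) =====
theorem infer_section_type_spec : Claim_equal_infer_section_type := by
  intro cell _
  unfold Spec_infer_section_type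
  rw [pvChain_A, pvAlt_eq, pvMain]
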